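-- pv_equiv track=rewrite | github.com/nking-1/Generativity | DAO/Rocq/src/Meta/generate_universe_arithmetic.py | generate_divisibility_facts
-- ===== SOURCE A (Python) =====
-- def generate_divisibility_facts(n):
--     """Generate divisibility facts."""
--     code = []
--     code.append("\n(* === DIVISIBILITY FACTS === *)")
--
--     # Positive divisibility
--     for i in range(2, n+1):
--         for j in range(i, n+1):
--             if j % i == 0:
--                 code.append(f"Definition U{i}_divides_U{j} : Prop := True.")
--
--     # Non-divisibility (for primes)
--     code.append("\n(* Non-divisibility facts *)")
--     for i in range(2, n+1):
--         for j in range(2, n+1):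
--             if j % i != 0:
--                 code.append(f"Definition U{i}_not_divides_U{j} : Prop := True.")
--
--     return "\n".join(code)
-- ===== SOURCE B (Python) =====
-- def _divides_row(n, i):
--     """Lines for the multiples of i, generated by stepping j += i (no % test)."""
--     out = []
--     j = i
--     while j <= n:
--         out.append(f"Definition U{i}_divides_U{j} : Prop := True.")
--         j += i
--     return out
--
--
-- def _not_divides_row(n, i):
--     """Lines for the non-multiples of i: walk j upward keeping the next multiple
--     m of i as a tracker and skip j exactly when it reaches m (no % test)."""
--     out = []
--     m = i
--     for j in range(2, n + 1):
--         if j == m: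
--             m += i
--         else:
--             out.append(f"Definition U{i}_not_divides_U{j} : Prop := True.")
--     return out
--
--
-- def generate_divisibility_facts(n):
--     """Generate divisibility facts."""
--     lines = ["\n(* === DIVISIBILITY FACTS === *)"]
--     for i in range(2, n + 1):
--         lines += _divides_row(n, i)
--     lines.append("\n(* Non-divisibility facts *)")
--     for i in range(2, n + 1):
--         lines += _not_divides_row(n, i)
--     return "\n".join(lines)
-- ===== Notes on version B (the rewrite author's own statement) =====
-- stated objective: alternative
-- what changed: B eliminates every % test: the divisibility section is produced per row by a while loop that steps j += i through the multiples, and the non-divisibility section walks j upward carrying the next multiple of i as a tracker and skips j exactly when it equals the tracker; rows come from two helper functions and the main body only concatenates them.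
import Mathlib
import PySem

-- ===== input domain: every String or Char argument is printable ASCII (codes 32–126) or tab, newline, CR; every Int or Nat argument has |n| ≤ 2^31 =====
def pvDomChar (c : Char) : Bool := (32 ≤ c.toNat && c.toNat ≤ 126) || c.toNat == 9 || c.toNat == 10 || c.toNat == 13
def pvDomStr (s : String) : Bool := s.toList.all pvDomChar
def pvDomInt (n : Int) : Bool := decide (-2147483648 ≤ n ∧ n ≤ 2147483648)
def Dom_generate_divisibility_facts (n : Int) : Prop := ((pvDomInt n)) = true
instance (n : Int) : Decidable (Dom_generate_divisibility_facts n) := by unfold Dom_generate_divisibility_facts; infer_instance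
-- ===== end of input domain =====

-- B removes every '%' test: the divisibility rows are produced by a while loop stepping j += i
-- through the multiples, and the non-divisibility rows by walking j upward with a next-multiple
-- tracker that is skipped when j reaches it; byte-identical output (same 'alternative' cost).

-- ===== PORT A =====
def generate_divisibility_facts (n : Int) : String :=
  let code : List String := ["\n(* === DIVISIBILITY FACTS === *)"]
  let code := (PySem.List.pyRange 2 (n+1) 1).foldl (fun code i =>
      (PySem.List.pyRange i (n+1) 1).foldl (fun code j =>
        if PySem.Int.mod j i == 0 then
          code ++ ["Definition U" ++ PySem.Int.toStr i ++ "_divides_U" ++ PySem.Int.toStr j ++ " : Prop := True."]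
        else code) code) code
  let code := code ++ ["\n(* Non-divisibility facts *)"]
  let code := (PySem.List.pyRange 2 (n+1) 1).foldl (fun code i =>
      (PySem.List.pyRange 2 (n+1) 1).foldl (fun code j =>
        if PySem.Int.mod j i != 0 then
          code ++ ["Definition U" ++ PySem.Int.toStr i ++ "_not_divides_U" ++ PySem.Int.toStr j ++ " : Prop := True."]
        else code) code) code
  PySem.Str.join "\n" code

-- ===== PORT B =====
-- _divides_row's while loop 'j = i; while j <= n: …; j += i' as structural recursion on j
-- (the '0 < i' conjunct only makes the recursion terminating; all calls have 2 ≤ i)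
def pvDividesRow (n i j : Int) : List String :=
  if h : 0 < i ∧ j ≤ n then
    ("Definition U" ++ PySem.Int.toStr i ++ "_divides_U" ++ PySem.Int.toStr j ++ " : Prop := True.")
      :: pvDividesRow n i (j + i)
  else []
termination_by (n + 1 - j).toNat
decreasing_by omega

-- _not_divides_row's for loop with the next-multiple tracker m as state (m, out)
def pvNotDividesRow (n i : Int) : List String :=
  ((PySem.List.pyRange 2 (n+1) 1).foldl
    (fun (st : Int × List String) j =>
      if j == st.1 then (st.1 + i, st.2)
      else (st.1, st.2 ++
        ["Definition U" ++ PySem.Int.toStr i ++ "_not_divides_U" ++ PySem.Int.toStr j ++ " : Prop := True."]))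
    (i, ([] : List String))).2

def generate_divisibility_facts_alt (n : Int) : String :=
  let lines : List String := ["\n(* === DIVISIBILITY FACTS === *)"]
  let lines := (PySem.List.pyRange 2 (n+1) 1).foldl (fun acc i => acc ++ pvDividesRow n i i) lines
  let lines := lines ++ ["\n(* Non-divisibility facts *)"]
  let lines := (PySem.List.pyRange 2 (n+1) 1).foldl (fun acc i => acc ++ pvNotDividesRow n i) lines
  PySem.Str.join "\n" lines

-- ===== PRECONDITION & SPEC =====
def Spec_generate_divisibility_facts (n : Int) (out : String) : Prop := out = generate_divisibility_facts_alt n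
instance (n : Int) (out : String) : Decidable (Spec_generate_divisibility_facts n out) := by unfold Spec_generate_divisibility_facts; infer_instance

-- ===== CLAIM (what is proved, stated in full; the proofs are below) =====
def Claim_equal_generate_divisibility_facts : Prop := ∀ (n : Int), Dom_generate_divisibility_facts n → Spec_generate_divisibility_facts n (generate_divisibility_facts n)

-- ===== LEMMAS AND PROOFS =====

-- between a number j and the next multiple m of i (m - i < j ≤ m) the mod-filter keeps nothing
theorem pv_filter_skip (i b : Int) (hi : 0 < i) :
    ∀ (k : Nat) (j m : Int), (m - j).toNat = k → i ∣ m → j ≤ m → m - i < j →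
    (PySem.List.pyRange j b 1).filter (fun x => PySem.Int.mod x i == 0)
      = (PySem.List.pyRange m b 1).filter (fun x => PySem.Int.mod x i == 0) := by
  intro k
  induction k with
  | zero =>
    intro j m hk hdvd h1 h2
    have : j = m := by omega
    subst this; rfl
  | succ k ih =>
    intro j m hk hdvd h1 h2
    have hjm : j < m := by omega
    have hnd : ¬ i ∣ j := by
      intro hdj
      have hsub : i ∣ (m - j) := dvd_sub hdvd hdj
      have := Int.le_of_dvd (by omega) hsub
      omega
    by_cases hb : j < b
    · rw [PySem.List.pyRange_one_cons hb, List.filter_cons]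
      have hfalse : (PySem.Int.mod j i == 0) = false := by
        simp only [beq_eq_false_iff_ne, ne_eq, PySem.Int.mod_eq_zero_iff_dvd]
        exact hnd
      rw [hfalse]
      simp only [Bool.false_eq_true, if_false]
      exact ih (j+1) m (by omega) hdvd (by omega) (by omega)
    · rw [PySem.List.pyRange_one_eq_nil (by omega : b ≤ j),
          PySem.List.pyRange_one_eq_nil (by omega : b ≤ m)]

-- the stepping while loop produces exactly the mod-filtered scan of A's inner loop
theorem pv_dividesRow_eq (n i : Int) (hi : 0 < i) :
    ∀ (k : Nat) (j : Int), (n + 1 - j).toNat = k → i ∣ j →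
    pvDividesRow n i j
      = ((PySem.List.pyRange j (n+1) 1).filter (fun x => PySem.Int.mod x i == 0)).map
          (fun j => "Definition U" ++ PySem.Int.toStr i ++ "_divides_U" ++ PySem.Int.toStr j ++ " : Prop := True.") := by
  intro k
  induction k using Nat.strong_induction_on with
  | _ k ih =>
    intro j hk hdvd
    by_cases hjn : j ≤ n
    · rw [pvDividesRow, dif_pos ⟨hi, hjn⟩]
      rw [PySem.List.pyRange_one_cons (by omega : j < n+1), List.filter_cons]
      have htrue : (PySem.Int.mod j i == 0) = true := by
        simp only [beq_iff_eq, PySem.Int.mod_eq_zero_iff_dvd]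
        exact hdvd
      rw [htrue]
      simp only [if_true, List.map_cons]
      rw [pv_filter_skip i (n+1) hi ((j+i) - (j+1)).toNat (j+1) (j+i) rfl
            (dvd_add hdvd dvd_rfl) (by omega) (by omega)]
      rw [ih (n + 1 - (j+i)).toNat (by omega) (j+i) rfl (dvd_add hdvd dvd_rfl)]
    · rw [pvDividesRow, dif_neg (by omega)]
      rw [PySem.List.pyRange_one_eq_nil (by omega : n+1 ≤ j)]
      rfl

-- the tracker loop produces exactly the (mod ≠ 0)-filtered scan of A's inner loop
theorem pv_notDivRow_fold (n i : Int) (hi : 0 < i) :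
    ∀ (k : Nat) (j m : Int) (acc : List String), (n + 1 - j).toNat = k → i ∣ m → j ≤ m → m < j + i →
    ((PySem.List.pyRange j (n+1) 1).foldl
        (fun (st : Int × List String) x =>
          if x == st.1 then (st.1 + i, st.2)
          else (st.1, st.2 ++
            ["Definition U" ++ PySem.Int.toStr i ++ "_not_divides_U" ++ PySem.Int.toStr x ++ " : Prop := True."]))
        (m, acc)).2
      = acc ++ ((PySem.List.pyRange j (n+1) 1).filter (fun x => PySem.Int.mod x i != 0)).map
          (fun x => "Definition U" ++ PySem.Int.toStr i ++ "_not_divides_U" ++ PySem.Int.toStr x ++ " : Prop := True.") := by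
  intro k
  induction k with
  | zero =>
    intro j m acc hk hdvd h1 h2
    rw [PySem.List.pyRange_one_eq_nil (by omega : n+1 ≤ j)]
    simp
  | succ k ih =>
    intro j m acc hk hdvd h1 h2
    have hjn : j < n + 1 := by omega
    rw [PySem.List.pyRange_one_cons hjn, List.foldl_cons, List.filter_cons]
    by_cases hjm : j = m
    · have hbeq : (j == m) = true := by simpa using hjm
      have hmod : (PySem.Int.mod j i != 0) = false := by
        simp only [bne_eq_false_iff_eq, PySem.Int.mod_eq_zero_iff_dvd]
        exact hjm ▸ hdvd
      rw [hbeq, hmod]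
      simp only [if_true, Bool.false_eq_true, if_false]
      exact ih (j+1) (m+i) acc (by omega) (dvd_add hdvd dvd_rfl) (by omega) (by omega)
    · have hjm' : j < m := by omega
      have hnd : ¬ i ∣ j := by
        intro hdj
        have hsub : i ∣ (m - j) := dvd_sub hdvd hdj
        have := Int.le_of_dvd (by omega) hsub
        omega
      have hbeq : (j == m) = false := by simpa using hjm
      have hmod : (PySem.Int.mod j i != 0) = true := by
        simp only [bne_iff_ne, ne_eq, PySem.Int.mod_eq_zero_iff_dvd]
        exact hnd
      rw [hbeq, hmod]
      simp only [Bool.false_eq_true, if_false, if_true, List.map_cons]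
      rw [ih (j+1) m _ (by omega) hdvd (by omega) (by omega)]
      simp

theorem generate_divisibility_facts_eq_alt (n : Int) :
    generate_divisibility_facts n = generate_divisibility_facts_alt n := by
  unfold generate_divisibility_facts generate_divisibility_facts_alt
  simp only [PySem.List.foldl_append_if, PySem.List.foldl_append_eq_flatMap]
  congr 1
  have hdiv : ∀ i ∈ PySem.List.pyRange 2 (n+1) 1,
      pvDividesRow n i i
        = ((PySem.List.pyRange i (n+1) 1).filter (fun x => PySem.Int.mod x i == 0)).map
            (fun j => "Definition U" ++ PySem.Int.toStr i ++ "_divides_U" ++ PySem.Int.toStr j ++ " : Prop := True.") := by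
    intro i hi
    have h2 : 2 ≤ i := ((PySem.List.mem_pyRange_one).mp hi).1
    exact pv_dividesRow_eq n i (by omega) (n + 1 - i).toNat i rfl dvd_rfl
  have hnondiv : ∀ i ∈ PySem.List.pyRange 2 (n+1) 1,
      pvNotDividesRow n i
        = ((PySem.List.pyRange 2 (n+1) 1).filter (fun x => PySem.Int.mod x i != 0)).map
            (fun x => "Definition U" ++ PySem.Int.toStr i ++ "_not_divides_U" ++ PySem.Int.toStr x ++ " : Prop := True.") := by
    intro i hi
    have h2 : 2 ≤ i := ((PySem.List.mem_pyRange_one).mp hi).1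
    unfold pvNotDividesRow
    rw [pv_notDivRow_fold n i (by omega) (n + 1 - 2).toNat 2 i [] rfl dvd_rfl (by omega) (by omega)]
    simp
  rw [List.flatMap_congr hdiv, List.flatMap_congr hnondiv]

-- ===== VERDICT (by name: the statement is the Claim_ definition above) =====
theorem generate_divisibility_facts_spec : Claim_equal_generate_divisibility_facts := by
  intro n _
  unfold Spec_generate_divisibility_facts
  exact generate_divisibility_facts_eq_alt n
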